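-- pv_equiv track=rewrite | github.com/edgaytanc/sistema-audita | auditoria/processors/excel/processor_anual_semestral.py | clasificar_cuentas_por_seccion
-- ===== SOURCE A (Python) =====
-- def clasificar_cuentas_por_seccion(balances, tipo_balance):
--     """Clasifica las cuentas del balance por sección."""
--     cuentas_por_seccion = {
--         'Activo': [],
--         'Pasivo': [],
--         'Patrimonio': [],
--         'ESTADO DE RESULTADOS': []
--     }
--
--     # Extraer cuentas únicas por sección
--     for clave in balances.keys():
--         partes = clave.split('-')
--         if len(partes) >= 5:
--             tipo, seccion = partes[0], partes[4]
--             cuenta = '-'.join(partes[5:])  # La cuenta puede tener guiones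
--             # Solo procesar las cuentas del tipo de balance especificado
--             if tipo == tipo_balance and seccion in cuentas_por_seccion and cuenta not in cuentas_por_seccion[seccion]:
--                 cuentas_por_seccion[seccion].append(cuenta)
--
--     # Ordenar cuentas dentro de cada sección
--     for seccion in cuentas_por_seccion:
--         cuentas_por_seccion[seccion].sort()
--
--     return cuentas_por_seccion
-- ===== SOURCE B (Python) =====
-- def clasificar_cuentas_por_seccion(balances, tipo_balance):
--     """Clasifica las cuentas del balance por sección: por cada sección filtra las
--     cuentas que le corresponden, las ordena y elimina duplicados adyacentes."""
--
--     def cuentas(seccion):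
--         xs = []
--         for clave in balances.keys():
--             partes = clave.split('-')
--             if len(partes) >= 5 and partes[0] == tipo_balance and partes[4] == seccion:
--                 xs.append('-'.join(partes[5:]))
--         xs.sort()
--         res = []
--         for c in xs:
--             if not res or res[-1] != c:
--                 res.append(c)
--         return res
--
--     return {s: cuentas(s)
--             for s in ['Activo', 'Pasivo', 'Patrimonio', 'ESTADO DE RESULTADOS']}
-- ===== Notes on version B (the rewrite author's own statement) =====
-- stated objective: alternative
-- what changed: Replaces the single-pass dict build with incremental membership dedup by a per-section pipeline: filter the matching cuentas, sort them, then remove adjacent duplicates in one linear scan.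
import Mathlib
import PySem

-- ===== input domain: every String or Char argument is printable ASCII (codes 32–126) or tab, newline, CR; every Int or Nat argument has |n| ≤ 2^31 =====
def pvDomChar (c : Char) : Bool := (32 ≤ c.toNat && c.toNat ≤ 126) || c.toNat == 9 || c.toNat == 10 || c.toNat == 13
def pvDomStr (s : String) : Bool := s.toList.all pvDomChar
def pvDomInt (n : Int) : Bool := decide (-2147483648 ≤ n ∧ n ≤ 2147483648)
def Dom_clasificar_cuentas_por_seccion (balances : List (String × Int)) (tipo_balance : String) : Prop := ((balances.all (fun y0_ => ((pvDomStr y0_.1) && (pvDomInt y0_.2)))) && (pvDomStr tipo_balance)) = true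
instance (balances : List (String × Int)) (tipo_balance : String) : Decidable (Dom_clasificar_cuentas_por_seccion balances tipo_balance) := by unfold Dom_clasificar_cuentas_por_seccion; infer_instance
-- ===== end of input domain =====

-- B replaces A's single-pass dict build with incremental membership dedup by a
-- per-section filter → sort → adjacent-dedup pipeline ('alternative', not claimed faster).

-- clave.split('-') : sep is the non-empty "-", so split? always returns some (getD [] is exact)
def pvSplit (clave : String) : List String := (PySem.Str.split? clave "-").getD []

-- ===== PORT A =====
-- literal port of A: a dict initialised with the four sections, one pass over the
-- keys appending each new cuenta to its section's list, then an in-place sort per key.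
def clasificar_cuentas_por_seccion (balances : List (String × Int)) (tipo_balance : String) : List (String × List String) :=
  let d0 : PySem.Dict String (List String) :=
    PySem.Dict.mk [("Activo", []), ("Pasivo", []), ("Patrimonio", []), ("ESTADO DE RESULTADOS", [])]
  let d := balances.foldl (fun d kv =>
    let partes := pvSplit kv.1
    if 5 ≤ partes.length then
      -- partes[0] / partes[4] are in range under the guard, so getD "" is exact
      let tipo := (PySem.List.pyGet? partes 0).getD ""
      let seccion := (PySem.List.pyGet? partes 4).getD ""
      let cuenta := PySem.Str.join "-" (PySem.List.slice partes (some 5) none)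
      if tipo == tipo_balance && PySem.Dict.contains d seccion
           && !((PySem.Dict.getD d seccion []).contains cuenta) then
        PySem.Dict.modify d seccion [] (fun l => l ++ [cuenta])
      else d
    else d) d0
  let d2 := (PySem.Dict.keys d).foldl
    (fun d' s => PySem.Dict.modify d' s [] (fun l => PySem.List.sorted l (fun x => x) false)) d
  d2.items

-- ===== PORT B =====
-- per-section helper of Source B: collect the matching cuentas, sort, drop adjacent duplicates
def pvCuentasB (balances : List (String × Int)) (tipo_balance seccion : String) : List String :=
  let xs := balances.foldl (fun xs kv =>
    let partes := pvSplit kv.1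
    if 5 ≤ partes.length && ((PySem.List.pyGet? partes 0).getD "" == tipo_balance)
         && ((PySem.List.pyGet? partes 4).getD "" == seccion) then
      xs ++ [PySem.Str.join "-" (PySem.List.slice partes (some 5) none)]
    else xs) []
  let xs := PySem.List.sorted xs (fun x => x) false
  xs.foldl (fun res c => if res.isEmpty || !(res.getLast? == some c) then res ++ [c] else res) []

def clasificar_cuentas_por_seccion_alt (balances : List (String × Int)) (tipo_balance : String) : List (String × List String) :=
  ["Activo", "Pasivo", "Patrimonio", "ESTADO DE RESULTADOS"].map
    (fun s => (s, pvCuentasB balances tipo_balance s))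

-- ===== PRECONDITION & SPEC =====
def Spec_clasificar_cuentas_por_seccion (balances : List (String × Int)) (tipo_balance : String) (out : List (String × List String)) : Prop := out = clasificar_cuentas_por_seccion_alt balances tipo_balance
instance (balances : List (String × Int)) (tipo_balance : String) (out : List (String × List String)) : Decidable (Spec_clasificar_cuentas_por_seccion balances tipo_balance out) := by unfold Spec_clasificar_cuentas_por_seccion; infer_instance

-- ===== CLAIM (what is proved, stated in full; the proofs are below) =====
def Claim_equal_clasificar_cuentas_por_seccion : Prop := ∀ (balances : List (String × Int)) (tipo_balance : String), Dom_clasificar_cuentas_por_seccion balances tipo_balance → Spec_clasificar_cuentas_por_seccion balances tipo_balance (clasificar_cuentas_por_seccion balances tipo_balance)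

-- ===== LEMMAS AND PROOFS =====

-- the cuenta extracted from a key
def pvCuentaOf (clave : String) : String :=
  PySem.Str.join "-" (PySem.List.slice (pvSplit clave) (some 5) none)

-- the combined match predicate for a section
def pvPred (tipo_balance seccion : String) (kv : String × Int) : Bool :=
  let partes := pvSplit kv.1
  5 ≤ partes.length && ((PySem.List.pyGet? partes 0).getD "" == tipo_balance)
    && ((PySem.List.pyGet? partes 4).getD "" == seccion)

-- the cuentas of a section, in input order
def pvM (balances : List (String × Int)) (tipo_balance seccion : String) : List String :=
  (balances.filter (pvPred tipo_balance seccion)).map (fun kv => pvCuentaOf kv.1)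

-- A's incremental dedup insertion
def pvIns (acc : List String) (c : String) : List String :=
  if acc.contains c then acc else acc ++ [c]

-- A's shape invariant: the dict always has exactly the four keys in order
def pvShape (a p t e : List String) : PySem.Dict String (List String) :=
  PySem.Dict.mk [("Activo", a), ("Pasivo", p), ("Patrimonio", t), ("ESTADO DE RESULTADOS", e)]

-- B's adjacent-dedup step
def pvDD (res : List String) (c : String) : List String :=
  if res.isEmpty || !(res.getLast? == some c) then res ++ [c] else res

lemma pvDD_eq (res : List String) (c : String) :
    pvDD res c = if res.getLast? = some c then res else res ++ [c] := by
  cases res with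
  | nil => simp [pvDD]
  | cons x xs => unfold pvDD; split_ifs <;> simp_all

lemma pw_getLast_le {acc : List String} {m : String} (h : acc.Pairwise (· < ·))
    (hm : acc.getLast? = some m) : ∀ a ∈ acc, a ≤ m := by
  induction acc with
  | nil => simp at hm
  | cons x xs ih =>
    cases xs with
    | nil => simp_all
    | cons y ys =>
      simp only [List.getLast?_cons_cons] at hm
      intro a ha
      rcases List.mem_cons.mp ha with rfl | ha
      · have hmem : m ∈ y :: ys := List.mem_of_getLast? hm
        exact le_of_lt ((List.pairwise_cons.mp h).1 m hmem)
      · exact ih (List.pairwise_cons.mp h).2 hm a ha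

lemma dd_go (l : List String) (acc : List String)
    (hl : l.Pairwise (· ≤ ·)) (hacc : acc.Pairwise (· < ·))
    (hcross : ∀ a ∈ acc, ∀ x ∈ l, a ≤ x) :
    (l.foldl pvDD acc).Pairwise (· < ·) ∧
      (∀ y, y ∈ l.foldl pvDD acc ↔ y ∈ acc ∨ y ∈ l) := by
  induction l generalizing acc with
  | nil => simpa using hacc
  | cons c t ih =>
    have hlt := (List.pairwise_cons.mp hl).2
    have hct : ∀ x ∈ t, c ≤ x := (List.pairwise_cons.mp hl).1
    simp only [List.foldl_cons, pvDD_eq]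
    by_cases hlast : acc.getLast? = some c
    · have hcmem : c ∈ acc := List.mem_of_getLast? hlast
      rw [if_pos hlast]
      obtain ⟨h1, h2⟩ := ih acc hlt hacc
        (fun a ha x hx => hcross a ha x (List.mem_cons_of_mem _ hx))
      refine ⟨h1, fun y => ?_⟩
      rw [h2]
      constructor
      · rintro (h | h) <;> simp_all
      · rintro (h | h)
        · exact Or.inl h
        · rcases List.mem_cons.mp h with rfl | h
          · exact Or.inl hcmem
          · exact Or.inr h
    · rw [if_neg hlast]
      have hlt' : ∀ a ∈ acc, a < c := by
        intro a ha
        have hle : a ≤ c := hcross a ha c (List.mem_cons_self ..)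
        rcases lt_or_eq_of_le hle with h | rfl
        · exact h
        · exfalso
          obtain ⟨m, hm⟩ := Option.isSome_iff_exists.mp
            (List.getLast?_isSome.mpr (List.ne_nil_of_mem ha))
          have h1 : a ≤ m := pw_getLast_le hacc hm a ha
          have h2 : m ≤ a := hcross m (List.mem_of_getLast? hm) a (List.mem_cons_self ..)
          exact hlast (by rwa [le_antisymm h2 h1] at hm)
      have hacc' : (acc ++ [c]).Pairwise (· < ·) := by
        rw [List.pairwise_append]
        exact ⟨hacc, List.pairwise_singleton _ _, by simpa using hlt'⟩
      obtain ⟨h1, h2⟩ := ih (acc ++ [c]) hlt hacc'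
        (by
          intro a ha x hx
          rcases List.mem_append.mp ha with ha | ha
          · exact hcross a ha x (List.mem_cons_of_mem _ hx)
          · simp at ha; subst ha; exact hct x hx)
      refine ⟨h1, fun y => ?_⟩
      rw [h2]
      simp [or_assoc]

lemma pvIns_nodup {acc : List String} (h : acc.Nodup) (c : String) : (pvIns acc c).Nodup := by
  unfold pvIns
  split_ifs with hc
  · exact h
  · simp_all [List.nodup_append]
    exact fun a ha hac => hc (hac ▸ ha)

lemma mem_pvIns (acc : List String) (c y : String) :
    y ∈ pvIns acc c ↔ y ∈ acc ∨ y = c := by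
  unfold pvIns
  split_ifs with hc
  · simp only [List.contains_eq_mem, decide_eq_true_eq] at hc
    exact ⟨Or.inl, fun h => h.elim id (fun h => h ▸ hc)⟩
  · simp

lemma ded_nodup (l : List String) (acc : List String) (h : acc.Nodup) :
    (l.foldl pvIns acc).Nodup := by
  induction l generalizing acc with
  | nil => simpa
  | cons c t ih => exact ih _ (pvIns_nodup h c)

lemma mem_ded (l : List String) (acc : List String) (y : String) :
    y ∈ l.foldl pvIns acc ↔ y ∈ acc ∨ y ∈ l := by
  induction l generalizing acc with
  | nil => simp
  | cons c t ih =>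
    simp only [List.foldl_cons, ih, mem_pvIns, List.mem_cons]
    tauto

-- the core exchange: sorting A's incrementally-deduped list equals
-- adjacent-deduping B's sorted list
lemma core (l : List String) :
    PySem.List.sorted (l.foldl pvIns []) (fun x => x) false
      = (PySem.List.sorted l (fun x => x) false).foldl pvDD [] := by
  have hs : (PySem.List.sorted l (fun x => x) false).Pairwise (· ≤ ·) := by
    simpa using PySem.List.sorted_pairwise l (fun x => x)
  obtain ⟨hpw, hmem⟩ := dd_go (PySem.List.sorted l (fun x => x) false) [] hs
    List.Pairwise.nil (by simp)
  apply PySem.List.sorted_eq_of_perm_of_pairwise_lt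
  · refine (List.perm_ext_iff_of_nodup ?_ ?_).mpr ?_
    · exact hpw.imp (fun h => ne_of_lt h)
    · exact ded_nodup l [] List.nodup_nil
    · intro y
      rw [hmem y, mem_ded]
      simp [PySem.List.mem_sorted]
  · simpa using hpw

-- B's per-section helper in terms of pvM
lemma cuentasB_eq (balances : List (String × Int)) (tb s : String) :
    pvCuentasB balances tb s
      = (PySem.List.sorted (pvM balances tb s) (fun x => x) false).foldl pvDD [] := by
  unfold pvCuentasB pvM
  have hfun : (fun (xs : List String) (kv : String × Int) =>
      let partes := pvSplit kv.1
      if 5 ≤ partes.length && ((PySem.List.pyGet? partes 0).getD "" == tb)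
           && ((PySem.List.pyGet? partes 4).getD "" == s) then
        xs ++ [PySem.Str.join "-" (PySem.List.slice partes (some 5) none)]
      else xs)
      = (fun acc kv => if pvPred tb s kv then acc ++ [pvCuentaOf kv.1] else acc) := rfl
  rw [hfun, PySem.List.foldl_append_if]
  rfl

-- one step of A's main loop on the four-key shape
lemma stepA_shape (tb : String) (kv : String × Int) (a p t e : List String) :
    (let partes := pvSplit kv.1
     if 5 ≤ partes.length then
       let tipo := (PySem.List.pyGet? partes 0).getD ""
       let seccion := (PySem.List.pyGet? partes 4).getD ""
       let cuenta := PySem.Str.join "-" (PySem.List.slice partes (some 5) none)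
       if tipo == tb && PySem.Dict.contains (pvShape a p t e) seccion
            && !((PySem.Dict.getD (pvShape a p t e) seccion []).contains cuenta) then
         PySem.Dict.modify (pvShape a p t e) seccion [] (fun l => l ++ [cuenta])
       else pvShape a p t e
     else pvShape a p t e)
    = pvShape (if pvPred tb "Activo" kv then pvIns a (pvCuentaOf kv.1) else a)
              (if pvPred tb "Pasivo" kv then pvIns p (pvCuentaOf kv.1) else p)
              (if pvPred tb "Patrimonio" kv then pvIns t (pvCuentaOf kv.1) else t)
              (if pvPred tb "ESTADO DE RESULTADOS" kv then pvIns e (pvCuentaOf kv.1) else e) := by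
  by_cases h5 : 5 ≤ (pvSplit kv.1).length
  · by_cases htb : ((PySem.List.pyGet? (pvSplit kv.1) 0).getD "" == tb)
    · by_cases hA : ((PySem.List.pyGet? (pvSplit kv.1) 4).getD "") = "Activo"
      · simp [pvPred, pvIns, pvCuentaOf, h5, htb, hA, pvShape, PySem.Dict.modify,
          PySem.Dict.insert, PySem.Dict.getD, PySem.Dict.get?_mk_cons]
        split_ifs <;> simp_all
      · by_cases hP : ((PySem.List.pyGet? (pvSplit kv.1) 4).getD "") = "Pasivo"
        · simp [pvPred, pvIns, pvCuentaOf, h5, htb, hP, pvShape, PySem.Dict.modify,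
            PySem.Dict.insert, PySem.Dict.getD, PySem.Dict.get?_mk_cons]
          split_ifs <;> simp_all
        · by_cases hT : ((PySem.List.pyGet? (pvSplit kv.1) 4).getD "") = "Patrimonio"
          · simp [pvPred, pvIns, pvCuentaOf, h5, htb, hT, pvShape, PySem.Dict.modify,
              PySem.Dict.insert, PySem.Dict.getD, PySem.Dict.get?_mk_cons]
            split_ifs <;> simp_all
          · by_cases hE : ((PySem.List.pyGet? (pvSplit kv.1) 4).getD "") = "ESTADO DE RESULTADOS"
            · simp [pvPred, pvIns, pvCuentaOf, h5, htb, hE, pvShape, PySem.Dict.modify,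
                PySem.Dict.insert, PySem.Dict.getD, PySem.Dict.get?_mk_cons]
              split_ifs <;> simp_all
            · have hc : PySem.Dict.contains (pvShape a p t e)
                  ((PySem.List.pyGet? (pvSplit kv.1) 4).getD "") = false := by
                simp [pvShape, Ne.symm hA, Ne.symm hP, Ne.symm hT, Ne.symm hE]
              simp [pvPred, h5, htb, hA, hP, hT, hE, hc]
    · simp [pvPred, h5, htb]
  · simp [pvPred, h5]

-- A's main loop preserves the four-key shape, accumulating per-section dedup lists
lemma foldA (balances : List (String × Int)) (tb : String) (a p t e : List String) :
    balances.foldl (fun d kv =>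
      let partes := pvSplit kv.1
      if 5 ≤ partes.length then
        let tipo := (PySem.List.pyGet? partes 0).getD ""
        let seccion := (PySem.List.pyGet? partes 4).getD ""
        let cuenta := PySem.Str.join "-" (PySem.List.slice partes (some 5) none)
        if tipo == tb && PySem.Dict.contains d seccion
             && !((PySem.Dict.getD d seccion []).contains cuenta) then
          PySem.Dict.modify d seccion [] (fun l => l ++ [cuenta])
        else d
      else d) (pvShape a p t e)
    = pvShape ((pvM balances tb "Activo").foldl pvIns a)
              ((pvM balances tb "Pasivo").foldl pvIns p)
              ((pvM balances tb "Patrimonio").foldl pvIns t)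
              ((pvM balances tb "ESTADO DE RESULTADOS").foldl pvIns e) := by
  induction balances generalizing a p t e with
  | nil => simp [pvM]
  | cons kv rest ih =>
    have hM : ∀ s, pvM (kv :: rest) tb s
        = (if pvPred tb s kv then [pvCuentaOf kv.1] else []) ++ pvM rest tb s := by
      intro s
      simp only [pvM, List.filter_cons]
      split_ifs <;> simp_all
    simp only [List.foldl_cons]
    rw [stepA_shape, ih]
    simp only [hM]
    split_ifs <;> simp

-- the final per-key sort loop on the shaped dict, and its items
lemma sortLoop (a p t e : List String) :
    ((PySem.Dict.keys (pvShape a p t e)).foldl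
        (fun d' s => PySem.Dict.modify d' s [] (fun l => PySem.List.sorted l (fun x => x) false))
        (pvShape a p t e)).items
      = [("Activo", PySem.List.sorted a (fun x => x) false),
         ("Pasivo", PySem.List.sorted p (fun x => x) false),
         ("Patrimonio", PySem.List.sorted t (fun x => x) false),
         ("ESTADO DE RESULTADOS", PySem.List.sorted e (fun x => x) false)] := by
  simp [pvShape, PySem.Dict.keys, PySem.Dict.modify, PySem.Dict.insert,
    PySem.Dict.getD, PySem.Dict.get?_mk_cons]

-- ===== VERDICT (by name: the statement is the Claim_ definition above) =====
theorem clasificar_cuentas_por_seccion_spec : Claim_equal_clasificar_cuentas_por_seccion := by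
  intro balances tb _
  show clasificar_cuentas_por_seccion balances tb = clasificar_cuentas_por_seccion_alt balances tb
  have hkey : ∀ s, PySem.List.sorted ((pvM balances tb s).foldl pvIns []) (fun x => x) false
      = pvCuentasB balances tb s := by
    intro s
    rw [core, cuentasB_eq]
  simp only [clasificar_cuentas_por_seccion, clasificar_cuentas_por_seccion_alt]
  rw [show (PySem.Dict.mk [("Activo", ([] : List String)), ("Pasivo", []), ("Patrimonio", []),
      ("ESTADO DE RESULTADOS", [])]) = pvShape [] [] [] [] from rfl]
  rw [foldA, sortLoop]
  simp [hkey]
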